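-- pv_equiv track=rewrite | github.com/gillsB/Alternative-Desktop-Python | settings.py | add_angle_brackets
-- ===== SOURCE A (Python) =====
-- def add_angle_brackets(text):
--     modifiers = {"alt", "ctrl", "shift"}  # Define the modifier keys
--     result = []
--     i = 0
--     while i < len(text):
--         found_modifier = False
--         for modifier in modifiers:
--             if text[i:i+len(modifier)].lower() == modifier:  # Check for modifier keys (case insensitive)
--                 result.append("<" + text[i:i+len(modifier)] + ">")
--                 i += len(modifier)
--                 found_modifier = True
--                 break
--         if not found_modifier:
--             result.append(text[i])
--             i += 1
--     return ''.join(result)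
-- ===== SOURCE B (Python) =====
-- def add_angle_brackets(text):
--     # Find-and-jump: locate the next keyword occurrence with str.find and copy
--     # whole chunks between matches, instead of scanning character by character.
--     low = text.lower()
--     out = []
--     i = 0
--     n = len(text)
--     while i < n:
--         best_j = -1
--         best_kw = ""
--         for kw in ("alt", "ctrl", "shift"):
--             j = low.find(kw, i)
--             if j != -1 and (best_j == -1 or j < best_j):
--                 best_j = j
--                 best_kw = kw
--         if best_j == -1:
--             out.append(text[i:])
--             break
--         out.append(text[i:best_j])
--         out.append("<" + text[best_j:best_j + len(best_kw)] + ">")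
--         i = best_j + len(best_kw)
--     return "".join(out)
-- ===== Notes on version B (the rewrite author's own statement) =====
-- stated objective: faster
-- what changed: A scans one character at a time, testing each of the three modifiers against a freshly lowered slice at every position; B lowers the text once and uses str.find to jump straight to the next keyword occurrence, copying the whole stretch between matches as a single slice.
import Mathlib
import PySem

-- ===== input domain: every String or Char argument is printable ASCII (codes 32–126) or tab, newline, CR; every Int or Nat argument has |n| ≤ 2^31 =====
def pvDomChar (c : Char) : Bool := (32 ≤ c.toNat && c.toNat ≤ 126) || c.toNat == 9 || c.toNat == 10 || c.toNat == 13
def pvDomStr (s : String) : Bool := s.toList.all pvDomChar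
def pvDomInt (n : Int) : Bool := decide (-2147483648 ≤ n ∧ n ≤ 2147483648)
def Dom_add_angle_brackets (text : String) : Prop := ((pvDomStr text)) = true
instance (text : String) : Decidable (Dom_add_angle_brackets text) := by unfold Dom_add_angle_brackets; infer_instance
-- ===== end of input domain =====

-- B replaces A's per-character scan by a find-and-jump chunk copier (str.find locates the
-- next keyword occurrence, the text between matches is copied as one slice); objective: faster
-- (same O(n), a constant-factor win measured).


-- ===== PORT A =====
-- Python set {"alt","ctrl","shift"} in insertion order; the iteration order of the set is
-- immaterial: no two modifiers can match at the same position (distinct first letters).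
def pvModifiers : List (List Char) := [['a','l','t'], ['c','t','r','l'], ['s','h','i','f','t']]

-- A's inner 'for modifier in modifiers' with break: the slice text[i:i+len(m)] of the first
-- modifier m with text[i:i+len(m)].lower() == m, none if the loop falls through.
def pvAFor : List (List Char) → List Char → Nat → Option (List Char)
  | [], _, _ => none
  | m :: ms, cs, i =>
    let sl := PySem.List.slice cs (some (i : Int)) (some ((i : Int) + (m.length : Int)))
    if PySem.Chars.lower sl = m then some sl else pvAFor ms cs i

-- termination helper for pvALoop (cited in decreasing_by): a matched slice is nonempty
theorem pvAFor_pos : ∀ (ms : List (List Char)) (cs : List Char) (i : Nat) (sl : List Char),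
    (∀ m ∈ ms, m ≠ []) → pvAFor ms cs i = some sl → 0 < sl.length := by
  intro ms
  induction ms with
  | nil => intro cs i sl _ h; simp [pvAFor] at h
  | cons m ms ih =>
    intro cs i sl hne h
    simp only [pvAFor] at h
    split_ifs at h with hc
    · injection h with h'
      subst h'
      have hlen := congrArg List.length hc
      simp only [PySem.Chars.lower, List.length_map] at hlen
      have hm : m ≠ [] := hne m (by simp)
      have : 0 < m.length := List.length_pos_iff.mpr hm
      omega
    · exact ih cs i sl (fun x hx => hne x (by simp [hx])) h

-- A's while loop: the list 'result' of appended pieces (joined at the end);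
-- text[i] with 0 ≤ i < len(text) is exactly cs[i]
def pvALoop (cs : List Char) (i : Nat) : List (List Char) :=
  if h : i < cs.length then
    match hm : pvAFor pvModifiers cs i with
    | some sl => ('<' :: (sl ++ ['>'])) :: pvALoop cs (i + sl.length)
    | none => [cs[i]] :: pvALoop cs (i + 1)
  else []
termination_by cs.length - i
decreasing_by
  · have := pvAFor_pos pvModifiers cs i sl (by simp [pvModifiers]) hm
    omega
  · omega

def add_angle_brackets (text : String) : String :=
  String.mk (PySem.Chars.join [] (pvALoop text.toList 0))

-- ===== PORT B =====
def pvKeywords : List (List Char) := [['a','l','t'], ['c','t','r','l'], ['s','h','i','f','t']]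

-- B's 'for kw in ("alt","ctrl","shift")' loop: state (best_j, best_kw)
def pvBFor : List (List Char) → List Char → Nat → Int × List Char → Int × List Char
  | [], _, _, best => best
  | kw :: rest, low, i, best =>
    let j := PySem.Chars.findFrom low kw (i : Int) none
    if j ≠ -1 ∧ (best.1 = -1 ∨ j < best.1) then pvBFor rest low i (j, kw)
    else pvBFor rest low i best

-- B's while loop, totalised with fuel: every iteration advances i by at least 1 in Python,
-- so the fuel len(text) + 1 supplied below is enough for a faithful run.
def pvBLoop (cs low : List Char) (fuel i : Nat) : List (List Char) :=
  match fuel with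
  | 0 => []
  | fuel + 1 =>
    if i < cs.length then
      let best := pvBFor pvKeywords low i (-1, [])
      if best.1 = -1 then
        [PySem.List.slice cs (some (i : Int)) none]    -- out.append(text[i:]); break
      else
        PySem.List.slice cs (some (i : Int)) (some best.1)
          :: ('<' :: (PySem.List.slice cs (some best.1) (some (best.1 + (best.2.length : Int))) ++ ['>']))
          :: pvBLoop cs low fuel (best.1.toNat + best.2.length)
    else []

def add_angle_brackets_alt (text : String) : String :=
  String.mk (PySem.Chars.join [] (pvBLoop text.toList (PySem.Chars.lower text.toList) (text.toList.length + 1) 0))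

-- ===== PRECONDITION & SPEC =====
def Spec_add_angle_brackets (text : String) (out : String) : Prop := out = add_angle_brackets_alt text
instance (text : String) (out : String) : Decidable (Spec_add_angle_brackets text out) := by unfold Spec_add_angle_brackets; infer_instance

-- ===== CLAIM (what is proved, stated in full; the proofs are below) =====
def Claim_equal_add_angle_brackets : Prop := ∀ (text : String), Dom_add_angle_brackets text → Spec_add_angle_brackets text (add_angle_brackets text)

-- ===== LEMMAS AND PROOFS =====

-- ''.join is concatenation
theorem pvJoinNil : ∀ (l : List (List Char)), PySem.Chars.join [] l = l.flatten := by
  intro l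
  induction l with
  | nil => simp [PySem.Chars.join_nil]
  | cons a t ih =>
    cases t with
    | nil => simp [PySem.Chars.join_singleton]
    | cons b t' => rw [PySem.Chars.join_cons_cons, ih]; simp

-- the first modifier that is a prefix of low.drop j (proof-side view of a match at j)
def pvHit (low : List Char) (j : Nat) : Option (List Char) :=
  pvModifiers.find? (fun m => m.isPrefixOf (low.drop j))

theorem pvSliceTake (cs : List Char) (i Ln : Nat) (L : Int) (hL : ((Ln : Nat) : Int) = L) :
    PySem.List.slice cs (some (i : Int)) (some ((i : Int) + L)) = (cs.drop i).take Ln := by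
  rw [← hL, PySem.List.slice_natCast_add]

-- A's match condition (lowered slice equality) is the prefix condition on the lowered text
theorem pvCondIff (cs m : List Char) (i : Nat) (L : Int) (hL : ((m.length : Nat) : Int) = L) :
    (PySem.Chars.lower (PySem.List.slice cs (some (i : Int)) (some ((i : Int) + L))) = m)
      ↔ m.isPrefixOf ((PySem.Chars.lower cs).drop i) := by
  rw [pvSliceTake cs i m.length L hL, List.isPrefixOf_iff_prefix, List.prefix_iff_eq_take]
  simp only [PySem.Chars.lower, ← List.map_drop, ← List.map_take, List.length_map]
  exact ⟨fun h => h.symm, fun h => h.symm⟩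

-- A's inner for-loop computes the slice of the hit
theorem pvAFor_eq_hit (cs : List Char) (i : Nat) :
    pvAFor pvModifiers cs i
      = Option.map (fun m => ((cs.drop i).take m.length)) (pvHit (PySem.Chars.lower cs) i) := by
  simp only [pvAFor, pvModifiers, pvHit, List.find?]
  by_cases h1 : (['a','l','t'] : List Char).isPrefixOf ((PySem.Chars.lower cs).drop i)
  · rw [if_pos ((pvCondIff cs ['a','l','t'] i _ (by norm_num)).mpr h1)]
    simp [h1, pvSliceTake cs i 3 3 (by norm_num)]
  · rw [if_neg (fun hc => h1 ((pvCondIff cs ['a','l','t'] i _ (by norm_num)).mp hc))]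
    by_cases h2 : (['c','t','r','l'] : List Char).isPrefixOf ((PySem.Chars.lower cs).drop i)
    · rw [if_pos ((pvCondIff cs ['c','t','r','l'] i _ (by norm_num)).mpr h2)]
      simp [h1, h2, pvSliceTake cs i 4 4 (by norm_num)]
    · rw [if_neg (fun hc => h2 ((pvCondIff cs ['c','t','r','l'] i _ (by norm_num)).mp hc))]
      by_cases h3 : (['s','h','i','f','t'] : List Char).isPrefixOf ((PySem.Chars.lower cs).drop i)
      · rw [if_pos ((pvCondIff cs ['s','h','i','f','t'] i _ (by norm_num)).mpr h3)]
        simp [h1, h2, h3, pvSliceTake cs i 5 5 (by norm_num)]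
      · rw [if_neg (fun hc => h3 ((pvCondIff cs ['s','h','i','f','t'] i _ (by norm_num)).mp hc))]
        simp [h1, h2, h3]

-- at most one modifier matches at a position (their first letters differ)
theorem pvHit_unique (low : List Char) (j : Nat) (m : List Char)
    (hm : m ∈ pvModifiers) (hp : m <+: low.drop j) : pvHit low j = some m := by
  simp only [pvModifiers, List.mem_cons, List.not_mem_nil, or_false] at hm
  obtain ⟨t, ht⟩ := hp
  rcases hm with h | h | h
  all_goals subst h
  all_goals simp only [pvHit, pvModifiers, List.find?, ← ht]
  all_goals simp [List.isPrefixOf]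

theorem pvHit_none_iff (low : List Char) (j : Nat) :
    pvHit low j = none ↔ ∀ m ∈ pvModifiers, ¬ m <+: low.drop j := by
  simp [pvHit, List.find?_eq_none, List.isPrefixOf_iff_prefix]

-- unfolding pvALoop at a hit
theorem pvALoop_hit (cs : List Char) (p : Nat) (hp : p < cs.length) (sl : List Char)
    (hm : pvAFor pvModifiers cs p = some sl) :
    pvALoop cs p = ('<' :: (sl ++ ['>'])) :: pvALoop cs (p + sl.length) := by
  rw [pvALoop]
  simp only [dif_pos hp]
  split
  · next sl' hm' => rw [hm] at hm'; injection hm' with h'; subst h'; rfl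
  · next hm' => rw [hm] at hm'; cases hm'

-- A skips every position with no hit, copying the characters one by one
theorem pvARun (cs : List Char) : ∀ (k i e : Nat), e - i ≤ k → i ≤ e → e ≤ cs.length →
    (∀ j, i ≤ j → j < e → pvHit (PySem.Chars.lower cs) j = none) →
    (pvALoop cs i).flatten = ((cs.drop i).take (e - i)) ++ (pvALoop cs e).flatten := by
  intro k
  induction k with
  | zero =>
    intro i e hk hie _ _
    have : i = e := by omega
    subst this; simp
  | succ k ih =>
    intro i e hk hie he h
    by_cases hieq : i = e
    · subst hieq; simp
    have hi : i < cs.length := by omega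
    rw [pvALoop]
    simp only [dif_pos hi]
    have hnone : pvAFor pvModifiers cs i = none := by
      rw [pvAFor_eq_hit, h i le_rfl (by omega)]; rfl
    split
    · next sl hm => rw [hnone] at hm; cases hm
    · next hm =>
      have step := ih (i + 1) e (by omega) (by omega) he (fun j hj1 hj2 => h j (by omega) hj2)
      simp only [List.flatten_cons, step]
      rw [List.drop_eq_getElem_cons hi]
      have : e - i = (e - (i + 1)) + 1 := by omega
      rw [this, List.take_succ_cons]
      simp

-- invariant of B's inner for-loop: best is the leftmost occurrence ≥ i of the keywords seen so far
def pvBInv (low : List Char) (i : Nat) (K : List (List Char)) (best : Int × List Char) : Prop :=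
  (best.1 = -1 ∧ ∀ kw ∈ K, ∀ j, i ≤ j → ¬ kw <+: low.drop j)
  ∨ (∃ p : Nat, best.1 = (p : Int) ∧ i ≤ p ∧ best.2 <+: low.drop p ∧ best.2 ∈ K ∧ best.2 ≠ []
      ∧ ∀ kw ∈ K, ∀ j, i ≤ j → j < p → ¬ kw <+: low.drop j)

theorem pvBFor_inv (low : List Char) (i : Nat) (hi : i ≤ low.length) :
    ∀ (ks K : List (List Char)) (best : Int × List Char), (∀ kw ∈ ks, kw ≠ []) →
    pvBInv low i K best → pvBInv low i (K ++ ks) (pvBFor ks low i best) := by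
  intro ks
  induction ks with
  | nil => intro K best _ hinv; simpa [pvBFor] using hinv
  | cons kw rest ih =>
    intro K best hne hinv
    simp only [pvBFor]
    have hrec : ∀ b, pvBInv low i (K ++ [kw]) b →
        pvBInv low i (K ++ kw :: rest) (pvBFor rest low i b) := by
      intro b hb
      have := ih (K ++ [kw]) b (fun x hx => hne x (by simp [hx])) hb
      simpa using this
    by_cases hc : PySem.Chars.findFrom low kw (i : Int) none ≠ -1
        ∧ (best.1 = -1 ∨ PySem.Chars.findFrom low kw (i : Int) none < best.1)
    · rw [if_pos hc]
      apply hrec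
      obtain ⟨hj, hor⟩ := hc
      obtain ⟨hle, hpre, hmin⟩ := PySem.Chars.findFrom_natCast_spec low kw i hi hj
      refine Or.inr ⟨(PySem.Chars.findFrom low kw (i : Int) none).toNat, by omega, by omega,
        hpre, by simp, hne kw (by simp), ?_⟩
      intro kw' hkw' j' hj1 hj2
      rcases (by simpa using hkw' : kw' ∈ K ∨ kw' = kw) with hK | hkww
      · rcases hinv with ⟨_, hnone⟩ | ⟨p, hp1, hp2, _, _, _, hmin'⟩
        · exact hnone kw' hK j' hj1
        · have : j' < p := by
            rcases hor with h | h
            · rw [hp1] at h; omega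
            · rw [hp1] at h; omega
          exact hmin' kw' hK j' hj1 this
      · subst hkww; exact hmin j' hj1 hj2
    · rw [if_neg hc]
      apply hrec
      push_neg at hc
      by_cases hj : PySem.Chars.findFrom low kw (i : Int) none = -1
      · have hno : ∀ j, i ≤ j → ¬ kw <+: low.drop j := by
          intro j hj' hpre
          have hinfix : kw <:+: low.drop i := by
            rw [← PySem.Chars.isIn_iff_infix, ← PySem.Chars.exists_prefix_drop_iff_isIn]
            refine ⟨j - i, ?_⟩
            rw [List.drop_drop]
            have hij : i + (j - i) = j := by omega
            rwa [hij]
          rw [PySem.Chars.findFrom_natCast_eq_neg_one_iff low kw i hi] at hj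
          exact hj hinfix
        rcases hinv with ⟨hb1, hnone⟩ | ⟨p, hp1, hp2, hp3, hp4, hp5, hmin'⟩
        · refine Or.inl ⟨hb1, ?_⟩
          intro kw' hkw' j' hj1
          rcases (by simpa using hkw' : kw' ∈ K ∨ kw' = kw) with hK | hkww
          · exact hnone kw' hK j' hj1
          · subst hkww; exact hno j' hj1
        · refine Or.inr ⟨p, hp1, hp2, hp3, by simp [hp4], hp5, ?_⟩
          intro kw' hkw' j' hj1 hj2
          rcases (by simpa using hkw' : kw' ∈ K ∨ kw' = kw) with hK | hkww
          · exact hmin' kw' hK j' hj1 hj2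
          · subst hkww; exact hno j' hj1
      · obtain ⟨hb1, hble⟩ := hc hj
        obtain ⟨hle, hpre, hmin⟩ := PySem.Chars.findFrom_natCast_spec low kw i hi hj
        rcases hinv with ⟨hb1', _⟩ | ⟨p, hp1, hp2, hp3, hp4, hp5, hmin'⟩
        · exact absurd hb1' hb1
        · refine Or.inr ⟨p, hp1, hp2, hp3, by simp [hp4], hp5, ?_⟩
          intro kw' hkw' j' hj1 hj2
          rcases (by simpa using hkw' : kw' ∈ K ∨ kw' = kw) with hK | hkww
          · exact hmin' kw' hK j' hj1 hj2
          · subst hkww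
            apply hmin j' hj1
            rw [hp1] at hble
            omega

-- main loop equivalence
theorem pvLoop_eq (cs : List Char) : ∀ (fuel i : Nat), i ≤ cs.length → cs.length - i < fuel →
    (pvALoop cs i).flatten = (pvBLoop cs (PySem.Chars.lower cs) fuel i).flatten := by
  intro fuel
  induction fuel with
  | zero => intro i hi hf; omega
  | succ f ih =>
    intro i hi hf
    have hlen : (PySem.Chars.lower cs).length = cs.length := by
      simp [PySem.Chars.lower]
    by_cases hil : i < cs.length
    · have hinv := pvBFor_inv (PySem.Chars.lower cs) i (by omega) pvKeywords [] (-1, [])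
        (by simp [pvKeywords]) (Or.inl ⟨rfl, by simp⟩)
      simp only [List.nil_append] at hinv
      rw [pvBLoop]
      simp only [if_pos hil]
      rcases hinv with ⟨hb1, hnone⟩ | ⟨p, hp1, hip, hpre, hmem, hne, hmin⟩
      · rw [if_pos hb1]
        have hA := pvARun cs cs.length i cs.length (by omega) (by omega) le_rfl
          (fun j hj1 hj2 => (pvHit_none_iff _ j).mpr
            (fun m hm => hnone m (by simpa [pvModifiers, pvKeywords] using hm) j hj1))
        rw [hA, pvALoop]
        simp [PySem.List.slice_from_natCast, List.take_of_length_le, List.length_drop]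
      · have hb1 : ¬ (pvBFor pvKeywords (PySem.Chars.lower cs) i (-1, [])).1 = -1 := by
          rw [hp1]; omega
        rw [if_neg hb1]
        have hmem' : (pvBFor pvKeywords (PySem.Chars.lower cs) i (-1, [])).2 ∈ pvModifiers := by
          simpa [pvModifiers, pvKeywords] using hmem
        have hplt : p < cs.length := by
          have : (PySem.Chars.lower cs).drop p ≠ [] := List.IsPrefix.ne_nil hpre hne
          have := List.drop_eq_nil_iff.not.mp (by simpa using this)
          omega
        set L := (pvBFor pvKeywords (PySem.Chars.lower cs) i (-1, [])).2.length with hLdef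
        have hL1 : 1 ≤ L := List.length_pos_iff.mpr hne
        have hpL : p + L ≤ cs.length := by
          have := List.IsPrefix.length_le hpre
          simp only [List.length_drop, hlen] at this
          omega
        have hhit := pvHit_unique (PySem.Chars.lower cs) p _ hmem' hpre
        have hAp : pvAFor pvModifiers cs p = some ((cs.drop p).take L) := by
          rw [pvAFor_eq_hit, hhit]; rfl
        have hsl : ((cs.drop p).take L).length = L := by
          rw [List.length_take, List.length_drop]; omega
        have hArun := pvARun cs p i p (by omega) (by omega) (by omega)
          (fun j hj1 hj2 => (pvHit_none_iff _ j).mpr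
            (fun m hm => hmin m (by simpa [pvModifiers, pvKeywords] using hm) j hj1 hj2))
        rw [hArun, pvALoop_hit cs p hplt _ hAp, hsl]
        have hIH := ih (p + L) (by omega) (by omega)
        have hs1 : PySem.List.slice cs (some (i : Int))
            (some (pvBFor pvKeywords (PySem.Chars.lower cs) i (-1, [])).1) = (cs.drop i).take (p - i) := by
          rw [hp1]
          have : ((p : Nat) : Int) = (i : Int) + ((p - i : Nat) : Int) := by omega
          rw [this, PySem.List.slice_natCast_add]
        have hs2 : PySem.List.slice cs (some (pvBFor pvKeywords (PySem.Chars.lower cs) i (-1, [])).1)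
            (some ((pvBFor pvKeywords (PySem.Chars.lower cs) i (-1, [])).1 + (L : Int)))
            = (cs.drop p).take L := by
          rw [hp1, PySem.List.slice_natCast_add]
        have hnext : (pvBFor pvKeywords (PySem.Chars.lower cs) i (-1, [])).1.toNat + L = p + L := by
          rw [hp1]; omega
        rw [hs1, hs2, hnext]
        simp only [List.flatten_cons, ← hIH]
    · have : i = cs.length := by omega
      subst this
      rw [pvALoop, pvBLoop]
      simp

-- ===== VERDICT (by name: the statement is the Claim_ definition above) =====
theorem add_angle_brackets_spec : Claim_equal_add_angle_brackets := by
  intro text _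
  unfold Spec_add_angle_brackets add_angle_brackets add_angle_brackets_alt
  rw [pvJoinNil, pvJoinNil, pvLoop_eq text.toList (text.toList.length + 1) 0 (by omega) (by omega)]
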